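-- pv_equiv track=rewrite | github.com/Wiz-Works/LearnShells | evasion/obfuscator.py | _replace_cmdlets
-- ===== SOURCE A (Python) =====
-- def _replace_cmdlets(code: str) -> str:
--     """Replace PowerShell cmdlets with aliases."""
--     replacements = {
--         'Invoke-Expression': 'iex',
--         'Get-Content': 'gc',
--         'Set-Content': 'sc',
--         'Write-Output': 'echo',
--         'ForEach-Object': '%',
--         'Where-Object': '?',
--         'Select-Object': 'select',
--         'New-Object': 'new',
--     }
--
--     for cmdlet, alias in replacements.items():
--         code = code.replace(cmdlet, alias)
--
--     return code
-- ===== SOURCE B (Python) =====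
-- def _replace_cmdlets(code: str) -> str:
--     """Replace PowerShell cmdlets with aliases in a single left-to-right scan."""
--     replacements = {
--         'Invoke-Expression': 'iex',
--         'Get-Content': 'gc',
--         'Set-Content': 'sc',
--         'Write-Output': 'echo',
--         'ForEach-Object': '%',
--         'Where-Object': '?',
--         'Select-Object': 'select',
--         'New-Object': 'new',
--     }
--
--     out = []
--     i = 0
--     n = len(code)
--     while i < n:
--         for cmdlet, alias in replacements.items():
--             if code.startswith(cmdlet, i):
--                 out.append(alias)
--                 i += len(cmdlet)
--                 break
--         else:
--             out.append(code[i])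
--             i += 1
--     return ''.join(out)
-- ===== Notes on version B (the rewrite author's own statement) =====
-- stated objective: alternative
-- what changed: Replaces the cascade of eight whole-string str.replace passes by a single left-to-right scan that emits the alias of the first cmdlet matching at the current position (or the current character); exact because the cmdlets are prefix-free, occurrences of distinct cmdlets never overlap, and no earlier-inserted alias can create or destroy a later cmdlet match.
import Mathlib
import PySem

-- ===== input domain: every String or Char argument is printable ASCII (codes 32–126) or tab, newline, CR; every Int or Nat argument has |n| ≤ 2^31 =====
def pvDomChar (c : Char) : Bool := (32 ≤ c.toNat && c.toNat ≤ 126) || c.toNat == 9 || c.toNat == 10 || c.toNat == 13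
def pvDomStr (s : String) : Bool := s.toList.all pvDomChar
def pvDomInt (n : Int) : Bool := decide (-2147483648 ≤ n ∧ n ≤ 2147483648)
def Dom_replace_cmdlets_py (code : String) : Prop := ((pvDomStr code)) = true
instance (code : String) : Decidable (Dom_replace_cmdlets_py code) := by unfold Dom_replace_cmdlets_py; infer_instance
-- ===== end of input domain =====

-- B replaces A's cascade of eight whole-string replace passes by a single left-to-right
-- scan emitting the alias of the first cmdlet matching at the current position
-- (objective: alternative single-pass formulation; not claimed faster).

-- ===== PORT A =====
-- the dict literal of A, as an association list in insertion order
def pvReps : List (String × String) :=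
  [("Invoke-Expression", "iex"), ("Get-Content", "gc"), ("Set-Content", "sc"),
   ("Write-Output", "echo"), ("ForEach-Object", "%"), ("Where-Object", "?"),
   ("Select-Object", "select"), ("New-Object", "new")]

-- for cmdlet, alias in replacements.items(): code = code.replace(cmdlet, alias)
def replace_cmdlets_py (code : String) : String :=
  pvReps.foldl (fun c p => PySem.Str.replace c p.1 p.2) code

-- ===== PORT B =====
-- B's replacement table, with keys/aliases as character lists (Source B scans characterwise)
def pvTableB : List (List Char × List Char) :=
  [("Invoke-Expression".toList, "iex".toList), ("Get-Content".toList, "gc".toList),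
   ("Set-Content".toList, "sc".toList), ("Write-Output".toList, "echo".toList),
   ("ForEach-Object".toList, "%".toList), ("Where-Object".toList, "?".toList),
   ("Select-Object".toList, "select".toList), ("New-Object".toList, "new".toList)]

lemma pvTableB_key_len : ∀ x ∈ pvTableB, 1 ≤ x.1.length := by decide

-- Source B's while loop: at each position, the first cmdlet that matches is emitted as its
-- alias (advance by its length), otherwise the current character is copied
def pvScanB : List Char → List Char
  | [] => []
  | c :: rest =>
    match hf : pvTableB.find? (fun ka => ka.1.isPrefixOf (c :: rest)) with
    | some ka => ka.2 ++ pvScanB ((c :: rest).drop ka.1.length)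
    | none => c :: pvScanB rest
termination_by cs => cs.length
decreasing_by
  · have h1 := pvTableB_key_len _ (List.mem_of_find?_eq_some hf)
    simp only [List.length_drop, List.length_cons]
    omega
  · simp

-- return ''.join(out)
def replace_cmdlets_py_alt (code : String) : String :=
  String.ofList (pvScanB code.toList)

-- ===== PRECONDITION & SPEC =====
def Spec_replace_cmdlets_py (code : String) (out : String) : Prop := out = replace_cmdlets_py_alt code
instance (code : String) (out : String) : Decidable (Spec_replace_cmdlets_py code out) := by unfold Spec_replace_cmdlets_py; infer_instance

-- ===== CLAIM (what is proved, stated in full; the proofs are below) =====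
def Claim_equal_replace_cmdlets_py : Prop := ∀ (code : String), Dom_replace_cmdlets_py code → Spec_replace_cmdlets_py code (replace_cmdlets_py code)

-- ===== LEMMAS AND PROOFS =====

-- clean recursive form of Python's str.replace (left-to-right, leftmost match) for a
-- nonempty pattern; proved below to agree with PySem.Chars.replace
def pvRepL (k a : List Char) : List Char → List Char
  | [] => []
  | c :: rest =>
    if k.isPrefixOf (c :: rest) ∧ k ≠ [] then a ++ pvRepL k a (rest.drop (k.length - 1))
    else c :: pvRepL k a rest
termination_by cs => cs.length
decreasing_by
  · simp only [List.length_drop, List.length_cons]; omega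
  · simp

-- the cascade of replaces A performs, at the character-list level
def pvCascade (t : List (List Char × List Char)) (cs : List Char) : List Char :=
  t.foldl (fun s p => pvRepL p.1 p.2 s) cs

-- compat p t = "p and t agree on their common prefix length" — iff p can match t ++ Z for some Z
def pvCompat : List Char → List Char → Bool
  | _, [] => true
  | [], _ => true
  | a :: p, b :: t => a == b && pvCompat p t

-- the no-interference conditions between table entries that make the single pass exact:
-- for x before y in the table: x's alias cannot complete a match of y's key (1st),
-- x's key never matches inside y's key (2nd), y's key never matches inside x's alias (3rd)
def pvGood : List (List Char × List Char) → Bool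
  | [] => true
  | x :: t => !x.1.isEmpty &&
      t.all (fun y => ((List.range y.1.length).all fun m => !pvCompat (y.1.drop m) x.2) &&
                      ((List.range y.1.length).all fun m => !pvCompat x.1 (y.1.drop m)) &&
                      ((List.range x.2.length).all fun m => !pvCompat y.1 (x.2.drop m))) &&
      pvGood t

lemma pvGood_tableB : pvGood pvTableB = true := by decide

lemma pvRepL_cons (k a : List Char) (c : Char) (rest : List Char) :
    pvRepL k a (c :: rest) =
      if k.isPrefixOf (c :: rest) ∧ k ≠ [] then a ++ pvRepL k a (rest.drop (k.length - 1))
      else c :: pvRepL k a rest := by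
  rw [pvRepL]

lemma pvCompat_of_prefix_append : ∀ (p t Z : List Char), p <+: (t ++ Z) → pvCompat p t = true := by
  intro p
  induction p with
  | nil => intro t Z _; cases t <;> simp [pvCompat]
  | cons a p ih =>
    intro t Z h
    cases t with
    | nil => simp [pvCompat]
    | cons b t' =>
      rw [List.cons_append, List.cons_prefix_cons] at h
      simp [pvCompat, h.1, ih t' Z h.2]

lemma pvRepL_nil (k a : List Char) : pvRepL k a [] = [] := by simp [pvRepL]

lemma pvCascade_cons (x : List Char × List Char) (t : List (List Char × List Char))
    (cs : List Char) : pvCascade (x :: t) cs = pvCascade t (pvRepL x.1 x.2 cs) := by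
  simp [pvCascade]

lemma pvCascade_nil (t : List (List Char × List Char)) : pvCascade t [] = [] := by
  induction t with
  | nil => rfl
  | cons x t ih => rw [pvCascade_cons, pvRepL_nil]; exact ih

-- PySem.Chars.replace agrees with pvRepL for a nonempty pattern
lemma pvReplace_go_eq (old new : List Char) (hold : old ≠ []) :
    ∀ (fuel : Nat) (l acc : List Char), l.length ≤ fuel →
      PySem.Chars.replace.go old new fuel l acc = acc.reverse ++ pvRepL old new l := by
  intro fuel
  induction fuel with
  | zero =>
    intro l acc hl
    have : l = [] := List.length_eq_zero_iff.mp (Nat.le_zero.mp hl)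
    subst this
    simp [PySem.Chars.replace.go, pvRepL_nil]
  | succ fuel ih =>
    intro l acc hl
    cases l with
    | nil => simp [PySem.Chars.replace.go, pvRepL_nil]
    | cons c t =>
      obtain ⟨o, os, rfl⟩ : ∃ o os, old = o :: os := by
        cases old with
        | nil => exact absurd rfl hold
        | cons o os => exact ⟨o, os, rfl⟩
      rw [PySem.Chars.replace.go, pvRepL_cons]
      by_cases hp : (o :: os).isPrefixOf (c :: t) = true
      · rw [if_pos hp, if_pos ⟨hp, hold⟩]
        have hlen : (List.drop (o :: os).length (c :: t)).length ≤ fuel := by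
          simp only [List.length_drop, List.length_cons] at *
          omega
        rw [ih _ _ hlen]
        simp [List.drop_succ_cons]
      · rw [if_neg hp, if_neg (fun h => hp h.1)]
        rw [ih t (c :: acc) (by simpa using Nat.le_of_succ_le_succ hl)]
        simp

lemma pvStrReplace_toList (s o n : String) (ho : o.toList ≠ []) :
    (PySem.Str.replace s o n).toList = pvRepL o.toList n.toList s.toList := by
  have h := pvReplace_go_eq o.toList n.toList ho s.length s.toList [] (by simp)
  simp only [List.reverse_nil, List.nil_append] at h
  simp [PySem.Str.replace, PySem.Chars.replace, List.isEmpty_iff, ho, h]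

-- a replace pass slides over a block t inside which (at every offset) no match can start
lemma pvPushKey (p a : List Char) : ∀ (t Z : List Char),
    (∀ m, m < t.length → pvCompat p (t.drop m) = false) →
    pvRepL p a (t ++ Z) = t ++ pvRepL p a Z := by
  intro t
  induction t with
  | nil => intro Z _; simp
  | cons c t' ih =>
    intro Z h
    rw [List.cons_append, pvRepL_cons]
    have hnp : ¬ (p.isPrefixOf (c :: (t' ++ Z)) = true ∧ p ≠ []) := by
      rintro ⟨h1, -⟩
      have hc := pvCompat_of_prefix_append p (c :: t') Z
        (by rw [List.cons_append]; exact List.isPrefixOf_iff_prefix.mp h1)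
      have := h 0 (by simp)
      simp only [List.drop_zero] at this
      rw [hc] at this
      exact Bool.noConfusion this
    rw [if_neg hnp, ih Z (fun m hm => by
      have := h (m + 1) (by simpa using Nat.succ_lt_succ hm)
      simpa using this)]
    rfl

-- a replace pass by (p, a) cannot create a match of a suffix of q at the front
lemma pvPushNomatch (p a q : List Char)
    (hq : ∀ m, m < q.length → pvCompat (q.drop m) a = false) :
    ∀ (cs : List Char) (m : Nat), ¬ (q.drop m) <+: cs → ¬ (q.drop m) <+: pvRepL p a cs := by
  intro cs
  induction cs with
  | nil => intro m h; rw [pvRepL_nil]; exact h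
  | cons c rest ih =>
    intro m h hcon
    have hmlt : m < q.length := by
      by_contra hge
      have : q.drop m = [] := List.drop_eq_nil_of_le (Nat.le_of_not_lt hge)
      rw [this] at h
      exact h (List.nil_prefix)
    rw [pvRepL_cons] at hcon
    split_ifs at hcon with hg
    · have hc := pvCompat_of_prefix_append (q.drop m) a _ hcon
      rw [hq m hmlt] at hc
      exact Bool.noConfusion hc
    · obtain ⟨d, ds, hds⟩ : ∃ d ds, q.drop m = d :: ds := by
        cases hqe : q.drop m with
        | nil => rw [hqe] at h; exact absurd List.nil_prefix h
        | cons d ds => exact ⟨d, ds, rfl⟩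
      rw [hds, List.cons_prefix_cons] at hcon
      have hds1 : q.drop (m + 1) = ds := by
        have h2 : List.drop 1 (List.drop m q) = List.drop (m + 1) q := List.drop_drop
        rw [← h2, hds]
        rfl
      have hnr : ¬ q.drop (m + 1) <+: rest := by
        rw [hds1]
        intro hx
        exact h (by rw [hds, hcon.1, List.cons_prefix_cons]; exact ⟨rfl, hx⟩)
      have := ih (m + 1) hnr
      rw [hds1] at this
      exact this hcon.2

lemma pvRepL_head (k a Z : List Char) (hk : k ≠ []) :
    pvRepL k a (k ++ Z) = a ++ pvRepL k a Z := by
  cases k with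
  | nil => exact absurd rfl hk
  | cons c k' =>
    rw [List.cons_append, pvRepL_cons,
      if_pos ⟨List.isPrefixOf_iff_prefix.mpr (by rw [← List.cons_append]; exact List.prefix_append _ _), hk⟩]
    simp

-- the whole cascade slides over a block u no table key can match inside
lemma pvCascadeKey : ∀ (t : List (List Char × List Char)) (u Z : List Char),
    (∀ x ∈ t, ∀ m, m < u.length → pvCompat x.1 (u.drop m) = false) →
    pvCascade t (u ++ Z) = u ++ pvCascade t Z := by
  intro t
  induction t with
  | nil => intro u Z _; rfl
  | cons x t ih =>
    intro u Z h
    rw [pvCascade_cons, pvPushKey x.1 x.2 u Z (h x (List.mem_cons_self)),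
      ih u _ (fun y hy => h y (List.mem_cons_of_mem _ hy)), pvCascade_cons]

-- when no key of t matches at the head, the cascade copies the head character
lemma pvCascadeNone : ∀ (t : List (List Char × List Char)), pvGood t = true →
    ∀ (c : Char) (rest : List Char), (∀ x ∈ t, ¬ x.1 <+: (c :: rest)) →
    pvCascade t (c :: rest) = c :: pvCascade t rest := by
  intro t
  induction t with
  | nil => intro _ c rest _; rfl
  | cons x t ih =>
    intro hg c rest h
    simp only [pvGood, Bool.and_eq_true, List.all_eq_true] at hg
    obtain ⟨⟨hne, hall⟩, hgt⟩ := hg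
    have hx : ¬ (x.1.isPrefixOf (c :: rest) = true ∧ x.1 ≠ []) := by
      rintro ⟨h1, -⟩
      exact h x List.mem_cons_self (List.isPrefixOf_iff_prefix.mp h1)
    have e1 : pvRepL x.1 x.2 (c :: rest) = c :: pvRepL x.1 x.2 rest := by
      rw [pvRepL_cons, if_neg hx]
    have hnext : ∀ y ∈ t, ¬ y.1 <+: (c :: pvRepL x.1 x.2 rest) := by
      intro y hy
      rw [← e1]
      have hcond : ∀ m, m < y.1.length → pvCompat (y.1.drop m) x.2 = false := by
        intro m hm
        have := hall y hy |>.1.1 m (List.mem_range.mpr hm)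
        simpa using this
      have := pvPushNomatch x.1 x.2 y.1 hcond (c :: rest) 0
        (by rw [List.drop_zero]; exact h y (List.mem_cons_of_mem _ hy))
      simpa using this
    rw [pvCascade_cons, e1, ih hgt c _ hnext, pvCascade_cons]

-- accessors into pvGood across an append
lemma pvGood_append : ∀ (t₁ : List (List Char × List Char)) (x : List Char × List Char)
    (t₂ : List (List Char × List Char)), pvGood (t₁ ++ x :: t₂) = true →
    (∀ y ∈ t₁, (∀ m, m < x.1.length → pvCompat y.1 (x.1.drop m) = false)) ∧
    x.1 ≠ [] ∧
    (∀ y ∈ t₂, (∀ m, m < x.2.length → pvCompat y.1 (x.2.drop m) = false)) := by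
  intro t₁
  induction t₁ with
  | nil =>
    intro x t₂ hg
    simp only [List.nil_append, pvGood, Bool.and_eq_true, List.all_eq_true] at hg
    obtain ⟨⟨hne, hall⟩, _⟩ := hg
    refine ⟨by simp, by simpa [List.isEmpty_iff] using hne, ?_⟩
    intro y hy m hm
    have := (hall y hy).2 m (List.mem_range.mpr hm)
    simpa using this
  | cons z t₁ ih =>
    intro x t₂ hg
    simp only [List.cons_append, pvGood, Bool.and_eq_true, List.all_eq_true] at hg
    obtain ⟨⟨hne, hall⟩, hgt⟩ := hg
    obtain ⟨ha, hb, hc⟩ := ih x t₂ hgt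
    refine ⟨?_, hb, hc⟩
    intro y hy
    rcases List.mem_cons.mp hy with rfl | hy'
    · intro m hm
      have := (hall x (by simp)).1.2 m (List.mem_range.mpr hm)
      simpa using this
    · exact ha y hy' 

-- main equivalence at the character level
lemma pvMain : ∀ (n : Nat) (cs : List Char), cs.length ≤ n →
    pvCascade pvTableB cs = pvScanB cs := by
  intro n
  induction n with
  | zero =>
    intro cs h
    have : cs = [] := List.length_eq_zero_iff.mp (Nat.le_zero.mp h)
    subst this
    rw [pvCascade_nil, pvScanB]
  | succ n ih =>
    intro cs hlen
    cases cs with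
    | nil => rw [pvCascade_nil, pvScanB]
    | cons c rest =>
      rw [pvScanB]
      cases hf : pvTableB.find? (fun ka => ka.1.isPrefixOf (c :: rest)) with
      | none =>
        have hnone := List.find?_eq_none.mp hf
        have hnm : ∀ x ∈ pvTableB, ¬ x.1 <+: (c :: rest) := by
          intro x hx hp
          exact hnone x hx (List.isPrefixOf_iff_prefix.mpr hp)
        rw [pvCascadeNone pvTableB pvGood_tableB c rest hnm]
        rw [ih rest (by simpa using Nat.le_of_succ_le_succ hlen)]
      | some ka =>
        show pvCascade pvTableB (c :: rest) = ka.2 ++ pvScanB (List.drop ka.1.length (c :: rest))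
        obtain ⟨hka, t₁, t₂, htab, -⟩ := List.find?_eq_some_iff_append.mp hf
        obtain ⟨Z, hZ⟩ := List.isPrefixOf_iff_prefix.mp hka
        obtain ⟨h₁, hne, h₂⟩ := pvGood_append t₁ ka t₂ (htab ▸ pvGood_tableB)
        have hk1 : 1 ≤ ka.1.length := pvTableB_key_len ka (List.mem_of_find?_eq_some hf)
        have hdrop : (c :: rest).drop ka.1.length = Z := by rw [← hZ, List.drop_left]
        rw [hdrop]
        have hcas : pvCascade pvTableB (c :: rest) = ka.2 ++ pvCascade pvTableB Z := by
          rw [htab, ← hZ]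
          unfold pvCascade
          rw [List.foldl_append, List.foldl_append]
          show pvCascade (ka :: t₂) (pvCascade t₁ (ka.1 ++ Z)) =
            ka.2 ++ pvCascade (ka :: t₂) (pvCascade t₁ Z)
          rw [pvCascadeKey t₁ ka.1 Z h₁, pvCascade_cons, pvCascade_cons,
            pvRepL_head ka.1 ka.2 _ hne, pvCascadeKey t₂ ka.2 _ h₂]
        rw [hcas, ih Z (by
          have hL := congrArg List.length hZ
          simp only [List.length_append, List.length_cons] at hL hlen
          omega)]

lemma pvPortA_eq (code : String) :
    replace_cmdlets_py code = String.ofList (pvCascade pvTableB code.toList) := by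
  have gen : ∀ (rs : List (String × String)) (code : String), (∀ p ∈ rs, p.1.toList ≠ []) →
      rs.foldl (fun c p => PySem.Str.replace c p.1 p.2) code =
        String.ofList (pvCascade (rs.map fun p => (p.1.toList, p.2.toList)) code.toList) := by
    intro rs
    induction rs with
    | nil => intro code _; simp [pvCascade, String.ofList_toList]
    | cons p rs ih =>
      intro code h
      rw [List.foldl_cons, ih _ (fun q hq => h q (List.mem_cons_of_mem _ hq)),
        List.map_cons, pvCascade_cons]
      congr 2
      exact pvStrReplace_toList code p.1 p.2 (h p List.mem_cons_self)
  have hmap : (pvReps.map fun p => (p.1.toList, p.2.toList)) = pvTableB := by decide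
  have := gen pvReps code (by decide)
  rw [replace_cmdlets_py, this, hmap]

-- ===== VERDICT (by name: the statement is the Claim_ definition above) =====
theorem replace_cmdlets_py_spec : Claim_equal_replace_cmdlets_py := by
  intro code _
  unfold Spec_replace_cmdlets_py replace_cmdlets_py_alt
  rw [pvPortA_eq, pvMain code.toList.length code.toList le_rfl]
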